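-- pv_equiv track=rewrite | github.com/RichardBangs/adventofcode2023 | 2023/day14/main.py | countNorth
-- ===== SOURCE A (Python) =====
-- class NodeType():
-- 	ROCK = 'O'
-- 	STOP = '#'
-- 	EMPTY = '.'
--
-- def countNorth(area : [[chr]]) -> int:
--
-- 	numRows = len(area)
-- 	numCols = len(area[0])
--
-- 	sum = 0
--
-- 	for x in range(numCols):
-- 		for y in range(numRows):
--
-- 			if(area[y][x] != NodeType.ROCK):
-- 				continue
--
-- 			sum += numRows - y
--
--
--
-- 	return sum
-- ===== SOURCE B (Python) =====
-- def countNorth(area):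
--     width = len(area[0])
--     total = 0
--     running = 0
--     for row in area:
--         running += row[:width].count('O')
--         total += running
--     return total
-- ===== Notes on version B (the rewrite author's own statement) =====
-- stated objective: alternative
-- what changed: Replaced the column-major per-cell weight accumulation (numRows - y per rock) by a prefix-count sweep: one top-down pass keeps a running count of rocks seen so far and adds it to the total once per row, so each rock is counted once per row at or below it and no weight is ever computed.
import Mathlib
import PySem

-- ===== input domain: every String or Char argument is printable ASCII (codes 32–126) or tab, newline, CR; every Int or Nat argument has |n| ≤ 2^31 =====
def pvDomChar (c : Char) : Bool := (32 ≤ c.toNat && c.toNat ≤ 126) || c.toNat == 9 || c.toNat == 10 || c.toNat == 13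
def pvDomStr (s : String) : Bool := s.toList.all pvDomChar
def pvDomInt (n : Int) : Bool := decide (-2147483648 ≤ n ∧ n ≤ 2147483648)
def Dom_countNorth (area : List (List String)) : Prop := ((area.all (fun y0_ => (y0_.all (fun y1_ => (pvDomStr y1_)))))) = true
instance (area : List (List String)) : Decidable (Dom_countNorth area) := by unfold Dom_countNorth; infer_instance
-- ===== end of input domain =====

-- B replaces A's column-major per-cell weight accumulation by a prefix-count sweep:
-- one top-down pass keeps a running count of rocks seen so far and adds it to the
-- total once per row, so a rock in row y is counted once for each of the
-- numRows - y rows at or below it and no weight is ever computed.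

-- ===== PORT A =====
-- literal port of A: nested for-loops over range(numCols) × range(numRows),
-- adding numRows - y per rock cell; indexing via pyGetD (in range under Pre_).
def countNorth (area : List (List String)) : Int :=
  let numRows : Int := area.length
  let numCols : Int := ((PySem.List.pyGet? area 0).getD []).length
  (PySem.List.pyRange 0 numCols 1).foldl (fun s x =>
    (PySem.List.pyRange 0 numRows 1).foldl (fun s y =>
      if PySem.List.pyGetD (PySem.List.pyGetD area y []) x "" ≠ "O" then s
      else s + (numRows - y)) s) 0

-- ===== PORT B =====
-- literal port of Source B: one pass over the rows carrying (total, running);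
-- running += row[:width].count('O'); total += running.
def countNorth_alt (area : List (List String)) : Int :=
  let width : Int := ((PySem.List.pyGet? area 0).getD []).length
  (area.foldl (fun (st : Int × Int) row =>
      (st.1 + (st.2 + ((PySem.List.slice row none (some width)).count "O" : Int)),
       st.2 + ((PySem.List.slice row none (some width)).count "O" : Int)))
    ((0 : Int), (0 : Int))).1

-- ===== PRECONDITION & SPEC =====
-- Pre_ excludes exactly the inputs where A raises IndexError: the empty grid
-- (area[0]) and ragged grids with some row shorter than row 0 (area[y][x]).
def Pre_countNorth (area : List (List String)) : Prop :=
  area ≠ [] ∧ ∀ row ∈ area, (area.headD []).length ≤ row.length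
instance (area : List (List String)) : Decidable (Pre_countNorth area) := by
  unfold Pre_countNorth; infer_instance
def pvWitness_countNorth : List (List String) := [["O", "."], ["#", "O"]]

def Spec_countNorth (area : List (List String)) (out : Int) : Prop := out = countNorth_alt area
instance (area : List (List String)) (out : Int) : Decidable (Spec_countNorth area out) := by unfold Spec_countNorth; infer_instance

-- ===== CLAIM (what is proved, stated in full; the proofs are below) =====
def Claim_equal_countNorth : Prop := ∀ (area : List (List String)), Dom_countNorth area → Pre_countNorth area → Spec_countNorth area (countNorth area)

-- ===== LEMMAS AND PROOFS =====

-- list-range sum = Finset.range sum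
theorem pv_listSum_range (n : Nat) (f : Nat → Int) :
    ((List.range n).map f).sum = ∑ i ∈ Finset.range n, f i := by
  induction n with
  | zero => simp
  | succ k ih => rw [List.range_succ, Finset.sum_range_succ]; simp [ih]

-- A's inner loop shape ('continue' unless rock): fold of a guarded add is a sum
theorem pv_foldl_ite_add {β : Type} (p : β → Prop) [DecidablePred p] (w : β → Int)
    (l : List β) (a : Int) :
    l.foldl (fun s y => if p y then s else s + w y) a
      = a + (l.map (fun y => if p y then 0 else w y)).sum := by
  induction l generalizing a with
  | nil => simp
  | cons y l ih =>
    simp only [List.foldl_cons, List.map_cons, List.sum_cons, ih]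
    by_cases h : p y
    · simp [h]
    · simp only [if_neg h]; omega

-- per-row: the column sum of a rock-indicator weighted by w is w * count of "O"
-- in the first c cells, for a row of length ≥ c.
theorem pv_row_sum (row : List String) (c : Nat) (hc : c ≤ row.length) (w : Int) :
    (∑ x ∈ Finset.range c, (if row.getD x "" ≠ "O" then 0 else w))
      = w * ((row.take c).count "O" : Int) := by
  induction c with
  | zero => simp
  | succ k ih =>
    have hk : k < row.length := by omega
    have hg : row.getD k "" = row[k] := by
      simp [List.getD_eq_getElem?_getD, List.getElem?_eq_getElem hk]
    have ht : (row.take (k + 1)).count "O"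
        = (row.take k).count "O" + (if row[k] = "O" then 1 else 0) := by
      rw [List.take_add_one, List.getElem?_eq_getElem hk]
      simp only [Option.toList_some, List.count_append, List.count_cons, List.count_nil]
      by_cases h : row[k] = "O" <;> simp [h]
    rw [Finset.sum_range_succ, ih (by omega), hg, ht]
    by_cases h : row[k] = "O"
    · rw [if_neg (by simp [h] : ¬ row[k] ≠ "O"), if_pos h]; push_cast; ring
    · rw [if_pos h, if_neg h]; push_cast; ring

-- B's pair-fold: final total = initial total + len*running + weighted sum of the counts
theorem pv_fold_pair (l : List Int) (a b : Int) :
    (l.foldl (fun (st : Int × Int) c => (st.1 + (st.2 + c), st.2 + c)) (a, b)).1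
      = a + (l.length : Int) * b
        + ∑ i ∈ Finset.range l.length, ((l.length : Int) - i) * l.getD i 0 := by
  induction l generalizing a b with
  | nil => simp
  | cons c l ih =>
    simp only [List.foldl_cons, ih, List.length_cons]
    rw [Finset.sum_range_succ']
    have : ∀ i ∈ Finset.range l.length,
        (((l.length + 1 : Nat) : Int) - ((i : Nat) + 1 : Nat)) * (c :: l).getD (i + 1) 0
          = ((l.length : Int) - i) * l.getD i 0 := by
      intro i _
      simp only [List.getD_cons_succ]
      push_cast; ring_nf
    rw [Finset.sum_congr rfl this]
    simp only [List.getD_cons_zero]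
    push_cast; ring

theorem countNorth_eq (area : List (List String)) (h : Pre_countNorth area) :
    countNorth area = countNorth_alt area := by
  obtain ⟨hne, hlen⟩ := h
  obtain ⟨r, rs, rfl⟩ := List.exists_cons_of_ne_nil hne
  set A := r :: rs with hA
  have h0 : PySem.List.pyGet? A 0 = some r := by
    simp [hA, PySem.List.pyGet?, PySem.List.pyIdx?]
  set n : Nat := A.length with hn
  set c : Nat := r.length with hc
  have hcnt : ∀ row : List String,
      ((PySem.List.slice row none (some ((c : Nat) : Int))).count "O" : Int)
        = ((row.take c).count "O" : Int) := by
    intro row; rw [PySem.List.slice_to_natCast]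
  -- normalise A's port to a double sum over Nat ranges
  have ha : countNorth A =
      ∑ x ∈ Finset.range c, ∑ y ∈ Finset.range n,
        (if (A.getD y []).getD x "" ≠ "O" then 0 else (n : Int) - y) := by
    show (PySem.List.pyRange 0 (((PySem.List.pyGet? A 0).getD [] : List String).length : Int) 1).foldl
        (fun s x => (PySem.List.pyRange 0 ((A.length : Nat) : Int) 1).foldl
          (fun s y => if PySem.List.pyGetD (PySem.List.pyGetD A y []) x "" ≠ "O" then s
                      else s + (((A.length : Nat) : Int) - y)) s) 0 = _
    rw [h0]
    simp only [Option.getD_some]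
    simp only [pv_foldl_ite_add]
    rw [PySem.List.foldl_add]
    simp only [PySem.List.pyRange_zero_nat, List.map_map, zero_add]
    rw [pv_listSum_range]
    refine Finset.sum_congr rfl ?_
    intro x _
    simp only [Function.comp_apply, Function.comp_def]
    rw [pv_listSum_range]
    refine Finset.sum_congr rfl ?_
    intro y hy
    simp [PySem.List.pyGetD_natCast, hn]
  -- normalise B's port to a weighted sum over rows (via the pair-fold lemma)
  have hb : countNorth_alt A =
      ∑ y ∈ Finset.range n, ((n : Int) - y) * (((A.getD y []).take c).count "O" : Int) := by
    show (A.foldl (fun (st : Int × Int) row =>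
        (st.1 + (st.2 + ((PySem.List.slice row none (some (((PySem.List.pyGet? A 0).getD [] : List String).length : Int))).count "O" : Int)),
         st.2 + ((PySem.List.slice row none (some (((PySem.List.pyGet? A 0).getD [] : List String).length : Int))).count "O" : Int)))
        ((0 : Int), (0 : Int))).1 = _
    rw [h0]
    simp only [Option.getD_some]
    rw [← List.foldl_map
      (f := fun row : List String => ((PySem.List.slice row none (some ((r.length : Nat) : Int))).count "O" : Int))
      (g := fun (st : Int × Int) c => (st.1 + (st.2 + c), st.2 + c))]
    rw [pv_fold_pair]
    simp only [List.length_map, zero_add, mul_zero, add_zero]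
    refine Finset.sum_congr rfl ?_
    intro y hy
    have hy' : y < A.length := by
      simpa [hn] using Finset.mem_range.mp hy
    rw [List.getD_eq_getElem _ _ (by simpa using hy'), List.getElem_map,
        List.getD_eq_getElem _ _ hy']
    rw [hcnt]
  rw [ha, hb, Finset.sum_comm]
  refine Finset.sum_congr rfl ?_
  intro y hy
  have hy' : y < n := Finset.mem_range.mp hy
  have hmem : A.getD y [] ∈ A := by
    rw [List.getD_eq_getElem _ _ (by omega)]; exact List.getElem_mem _
  have hcle : c ≤ (A.getD y []).length := by
    have := hlen _ hmem; simp [hA] at this ⊢; omega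
  exact pv_row_sum _ c hcle _

-- ===== VERDICT (by name: the statement is the Claim_ definition above) =====
theorem countNorth_spec : Claim_equal_countNorth := by
  intro area _ hpre
  exact countNorth_eq area hpre
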